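-- pv_equiv track=rewrite | github.com/rgabrielsson/Lab10_whileItsBroken | EvilHangman.py | largest_set
-- ===== SOURCE A (Python) =====
-- def largest_set(wordDict):
--     maxKey = ""
--     maxSet = []
--     for key in wordDict:
--         if len(wordDict[key]) > len(maxSet):
--             maxKey = key
--             maxSet = wordDict[key]
--
--         #in the event of a tie, return the set the reveals the fewest letters
--         elif len(wordDict[key]) == len(maxSet):
--             if key.count("-") >= maxKey.count("-"):
--                 maxKey = key
--                 maxSet = wordDict[key]
--     return (maxKey,maxSet)
-- ===== SOURCE B (Python) =====
-- def largest_set(wordDict):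
--     if not wordDict:
--         return ("", [])
--     items = sorted(wordDict.items(),
--                    key=lambda kv: (len(kv[1]), kv[0].count("-")))
--     return items[-1]
-- ===== Notes on version B (the rewrite author's own statement) =====
-- stated objective: simpler
-- what changed: Replaces A's running-argmax loop with repeated dict lookups by a single stable sort of the items under the composite key (value-list length, dash count of the key), returning the last element; the 'last among ties' rule falls out of sort stability.
import Mathlib
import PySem

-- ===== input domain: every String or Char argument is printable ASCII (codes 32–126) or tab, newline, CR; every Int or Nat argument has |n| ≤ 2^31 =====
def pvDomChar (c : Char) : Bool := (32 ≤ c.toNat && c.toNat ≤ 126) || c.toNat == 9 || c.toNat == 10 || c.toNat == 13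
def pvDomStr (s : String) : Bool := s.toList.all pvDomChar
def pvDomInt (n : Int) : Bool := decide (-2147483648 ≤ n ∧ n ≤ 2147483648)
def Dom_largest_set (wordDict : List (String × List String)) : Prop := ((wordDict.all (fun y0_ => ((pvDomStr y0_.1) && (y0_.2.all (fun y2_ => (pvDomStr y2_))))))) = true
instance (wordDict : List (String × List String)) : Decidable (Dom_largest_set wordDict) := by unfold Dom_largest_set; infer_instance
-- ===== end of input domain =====

-- B replaces A's running-argmax loop (with its per-iteration dict lookups) by one stable
-- sort under the composite key (value length, dash count) and takes the last element: simpler.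


-- ===== PORT A =====
-- for key in wordDict: compare len(wordDict[key]) / dash counts against the running (maxKey, maxSet)
def largest_set (wordDict : List (String × List String)) : String × List String :=
  wordDict.foldl (fun acc p =>
    let key := p.1
    let v := PySem.Dict.getD ⟨wordDict⟩ key []   -- wordDict[key]
    if v.length > acc.2.length then (key, v)
    else if v.length = acc.2.length then
      if PySem.Str.count acc.1 "-" ≤ PySem.Str.count key "-" then (key, v) else acc
    else acc) ("", [])

-- ===== PORT B =====
-- stable sort of the items by (len(value), key.count('-')), then items[-1]
def largest_set_alt (wordDict : List (String × List String)) : String × List String :=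
  if wordDict = [] then ("", [])
  else (PySem.List.sorted2 wordDict (fun kv => kv.2.length)
          (fun kv => PySem.Str.count kv.1 "-")).getLastD ("", [])

-- ===== PRECONDITION & SPEC =====
-- Pre_ requires distinct keys: a Python dict cannot hold duplicate keys, so the assoc-list
-- encodings with duplicated keys represent no input A ever receives.
def Pre_largest_set (wordDict : List (String × List String)) : Prop :=
  (wordDict.map Prod.fst).Nodup
instance (wordDict : List (String × List String)) : Decidable (Pre_largest_set wordDict) := by unfold Pre_largest_set; infer_instance
def pvWitness_largest_set : (List (String × List String)) :=
  [("a-", ["x"]), ("b--", ["y"]), ("c", ["z"])]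
def Spec_largest_set (wordDict : List (String × List String)) (out : String × List String) : Prop := out = largest_set_alt wordDict
instance (wordDict : List (String × List String)) (out : String × List String) : Decidable (Spec_largest_set wordDict out) := by unfold Spec_largest_set; infer_instance

-- ===== CLAIM (what is proved, stated in full; the proofs are below) =====
def Claim_equal_largest_set : Prop := ∀ (wordDict : List (String × List String)), Dom_largest_set wordDict → Pre_largest_set wordDict → Spec_largest_set wordDict (largest_set wordDict)

-- ===== LEMMAS AND PROOFS =====

-- the two components of B's sort key
def pvK1 (p : String × List String) : Nat := p.2.length
def pvK2 (p : String × List String) : Nat := PySem.Str.count p.1 "-"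
-- the strict lexicographic comparison sorted2 uses
def pvBef (a b : String × List String) : Bool :=
  decide (pvK1 a < pvK1 b) || (!decide (pvK1 b < pvK1 a) && decide (pvK2 a < pvK2 b))

lemma pvBef_iff (a b : String × List String) :
    pvBef a b = true ↔ (pvK1 a < pvK1 b ∨ (pvK1 a = pvK1 b ∧ pvK2 a < pvK2 b)) := by
  simp [pvBef, Bool.or_eq_true, Bool.and_eq_true]
  omega

lemma pvBef_eq_false_iff (a b : String × List String) :
    pvBef a b = false ↔ ¬ (pvK1 a < pvK1 b ∨ (pvK1 a = pvK1 b ∧ pvK2 a < pvK2 b)) := by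
  rw [← pvBef_iff]
  cases pvBef a b <;> simp

-- getD of an assoc list with distinct keys, at a key of one of its pairs, is that pair's value
lemma pvGetD_nodup {l : List (String × List String)} {p : String × List String}
    (hn : (l.map Prod.fst).Nodup) (hp : p ∈ l) :
    PySem.Dict.getD ⟨l⟩ p.1 [] = p.2 := by
  induction l with
  | nil => cases hp
  | cons q t ih =>
    simp only [List.map_cons, List.nodup_cons] at hn
    rcases List.mem_cons.1 hp with h | h
    · subst h; simp [PySem.Dict.getD, PySem.Dict.get?]
    · have hne : q.1 ≠ p.1 := fun he => hn.1 (he ▸ List.mem_map_of_mem h)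
      have hbeq : (q.1 == p.1) = false := beq_eq_false_iff_ne.2 hne
      simp only [PySem.Dict.getD, PySem.Dict.get?] at *
      simp [hbeq]
      simpa using ih hn.2 h

-- A's update step, once the lookup is resolved, is "replace unless strictly smaller"
lemma pvAStep_eq (acc p : String × List String) :
    (if p.2.length > acc.2.length then p
     else if p.2.length = acc.2.length then
       if PySem.Str.count acc.1 "-" ≤ PySem.Str.count p.1 "-" then p else acc
     else acc)
    = if pvBef p acc = false then p else acc := by
  by_cases hb : pvBef p acc = true
  · have hlt := (pvBef_iff p acc).1 hb
    simp only [pvK1, pvK2] at hlt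
    rw [if_neg (show ¬ pvBef p acc = false by simp [hb])]
    split_ifs <;> first | rfl | omega
  · have hb' : pvBef p acc = false := by simpa using hb
    have hnot := (pvBef_eq_false_iff p acc).1 hb'
    simp only [pvK1, pvK2] at hnot
    rw [if_pos hb']
    split_ifs <;> first | rfl | omega

def pvSortedInv (l : List (String × List String)) : Prop :=
  l.Pairwise (fun a b => pvBef b a = false)

lemma pvInsertBy_nil (x : String × List String) :
    PySem.List.insertBy pvBef x [] = [x] := by
  simp [PySem.List.insertBy]

lemma pvInsertBy_ne_nil (x : String × List String) (l : List (String × List String)) :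
    PySem.List.insertBy pvBef x l ≠ [] := by
  cases l with
  | nil => simp [PySem.List.insertBy]
  | cons y ys =>
    simp only [PySem.List.insertBy]
    split <;> simp

lemma pvGetLastD_ne_nil {l : List (String × List String)} (h : l ≠ [])
    (d1 d2 : String × List String) : l.getLastD d1 = l.getLastD d2 := by
  cases l with
  | nil => exact absurd rfl h
  | cons y ys => rw [List.getLastD_cons, List.getLastD_cons]

-- insertBy preserves the sortedness invariant
lemma pvInsert_sorted (x : String × List String) {l : List (String × List String)}
    (h : pvSortedInv l) : pvSortedInv (PySem.List.insertBy pvBef x l) := by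
  induction l with
  | nil => simp [pvSortedInv, PySem.List.insertBy]
  | cons y ys ih =>
    rcases List.pairwise_cons.1 h with ⟨hy, hys⟩
    simp only [PySem.List.insertBy]
    split
    · rename_i hxy
      refine List.pairwise_cons.2 ⟨?_, h⟩
      intro z hz
      rw [pvBef_iff] at hxy
      rcases List.mem_cons.1 hz with hzy | hzys
      · subst hzy
        rw [pvBef_eq_false_iff]
        omega
      · have h1 := (pvBef_eq_false_iff z y).1 (hy z hzys)
        rw [pvBef_eq_false_iff]
        omega
    · rename_i hxy
      refine List.pairwise_cons.2 ⟨?_, ih hys⟩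
      intro z hz
      rcases (PySem.List.mem_insertBy _ _ _ _).1 hz with hzx | hzys
      · subst hzx; simpa using hxy
      · exact hy z hzys

-- the last element after an insertion: replaced iff the new element is not strictly smaller
lemma pvGetLastD_insert (x : String × List String) {l : List (String × List String)}
    (h : pvSortedInv l) :
    (PySem.List.insertBy pvBef x l).getLastD x
      = if pvBef x (l.getLastD x) = false then x else l.getLastD x := by
  induction l with
  | nil =>
    have hxx : pvBef x x = false := by
      rw [pvBef_eq_false_iff]; omega
    simp [PySem.List.insertBy, hxx]
  | cons y ys ih =>
    rcases List.pairwise_cons.1 h with ⟨hy, hys⟩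
    simp only [PySem.List.insertBy]
    split
    · rename_i hxy
      -- x inserted at the front; the last element is unchanged and pvBef x last = true
      have hlast : pvBef x ((y :: ys).getLastD x) = true := by
        have hmem : (y :: ys).getLastD x ∈ y :: ys := by
          cases ys with
          | nil => simp
          | cons z zs =>
            rw [List.getLastD_cons]
            have hmem' : (z :: zs).getLastD y ∈ z :: zs := by
              rw [List.getLastD_eq_getLast?]
              cases hzl : (z :: zs).getLast? with
              | none => simp at hzl
              | some w => simpa using List.mem_of_getLast? hzl
            exact List.mem_cons_of_mem _ hmem'
        rw [pvBef_iff]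
        rw [pvBef_iff] at hxy
        rcases List.mem_cons.1 hmem with hm | hm
        · rw [hm]; omega
        · have h1 := (pvBef_eq_false_iff _ y).1 (hy _ hm)
          omega
      rw [hlast]
      simp
    · rename_i hxy
      have hxy' : pvBef x y = false := by simpa using hxy
      cases ys with
      | nil =>
        simp [PySem.List.insertBy, hxy']
      | cons z zs =>
        rw [List.getLastD_cons, List.getLastD_cons,
            pvGetLastD_ne_nil (pvInsertBy_ne_nil x (z :: zs)) y x, ih hys]
        rw [pvGetLastD_ne_nil (show (z :: zs) ≠ [] by simp) x y]

-- main loop lemma: last of repeated insertion = running argmax fold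
lemma pvFold_eq (l : List (String × List String)) :
    ∀ (acc : List (String × List String)) (d : String × List String),
      pvSortedInv acc → acc ≠ [] →
      (l.foldl (fun a x => PySem.List.insertBy pvBef x a) acc).getLastD d
        = l.foldl (fun a x => if pvBef x a = false then x else a) (acc.getLastD d) := by
  induction l with
  | nil => intro acc d _ _; rfl
  | cons x t ih =>
    intro acc d hs hne
    simp only [List.foldl_cons]
    rw [ih _ d (pvInsert_sorted x hs) (pvInsertBy_ne_nil x acc)]
    congr 1
    rw [pvGetLastD_ne_nil (pvInsertBy_ne_nil x acc) d x, pvGetLastD_insert x hs,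
        pvGetLastD_ne_nil hne x d]

-- ===== VERDICT (by name: the statement is the Claim_ definition above) =====
theorem largest_set_spec : Claim_equal_largest_set := by
  intro wordDict _ hpre
  unfold Spec_largest_set largest_set largest_set_alt
  -- resolve A's dict lookups and rewrite its step into "replace unless strictly smaller"
  have hA : wordDict.foldl (fun acc p =>
      let key := p.1
      let v := PySem.Dict.getD ⟨wordDict⟩ key []
      if v.length > acc.2.length then (key, v)
      else if v.length = acc.2.length then
        if PySem.Str.count acc.1 "-" ≤ PySem.Str.count key "-" then (key, v) else acc
      else acc) ("", [])
      = wordDict.foldl (fun a x => if pvBef x a = false then x else a) ("", []) := by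
    apply PySem.List.foldl_congr_mem
    intro acc p hp
    simp only
    rw [pvGetD_nodup hpre hp]
    exact pvAStep_eq acc p
  rw [hA]
  cases wordDict with
  | nil => rfl
  | cons q t =>
    rw [if_neg (List.cons_ne_nil q t)]
    have hB : PySem.List.sorted2 (q :: t) (fun kv => kv.2.length)
        (fun kv => PySem.Str.count kv.1 "-")
        = (q :: t).foldl (fun a x => PySem.List.insertBy pvBef x a) [] := rfl
    rw [hB]
    simp only [List.foldl_cons, pvInsertBy_nil]
    rw [pvFold_eq t [q] ("", []) (by simp [pvSortedInv]) (by simp)]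
    simp only [List.getLastD_cons, List.getLastD_nil]
    have hfirst : (if pvBef q (("", []) : String × List String) = false then q
        else (("", []) : String × List String)) = q := by
      have h0 : pvBef q ("", []) = false := by
        rw [pvBef_eq_false_iff]
        have : pvK1 (("", []) : String × List String) = 0 := rfl
        have : pvK2 (("", []) : String × List String) = 0 := by decide
        omega
      rw [h0]; simp
    rw [hfirst]
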